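-- pv_equiv track=rewrite | github.com/CDCgov/pygriddler | griddler/schemas/v01.py | _match_nest
-- ===== SOURCE A (Python) =====
-- from collections.abc import Iterable
--
-- def _match_nest(nest: dict, param_sets: Iterable[dict]) -> int | None:
--     """Which parameter set does this nest match to?"""
--     matches = [_match_nest1(nest, ps) for ps in param_sets]
--     n_matches = matches.count(True)
--     if n_matches == 0:
--         return None
--     elif n_matches == 1:
--         return matches.index(True)
--     else:
--         raise RuntimeError(f"Nest {nest} matches multiple of {param_sets}")
--
-- def _match_nest1(nest: dict, param_set: dict) -> bool:
--     """Does this nest match this parameter set?"""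
--     common_keys = nest.keys() & param_set.keys()
--     nest_subset = {key: nest[key] for key in common_keys}
--     param_subset = {key: param_set[key] for key in common_keys}
--     return nest_subset == param_subset
-- ===== SOURCE B (Python) =====
-- def _match_nest(nest: dict, param_sets) -> int | None:
--     """Which parameter set does this nest match to?
--
--     Candidate-elimination: start with all indices, and for each nest key
--     strike out the parameter sets that carry a conflicting value for it.
--     """
--     psl = list(param_sets)
--     candidates = set(range(len(psl)))
--     for key, val in nest.items():
--         candidates = {i for i in candidates
--                       if key not in psl[i] or psl[i][key] == val}
--     if not candidates:
--         return None
--     if len(candidates) == 1: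
--         return candidates.pop()
--     raise RuntimeError(f"Nest {nest} matches multiple of {param_sets}")
-- ===== Notes on version B (the rewrite author's own statement) =====
-- stated objective: alternative
-- what changed: B replaces A's scan-each-param-set-and-count approach by candidate elimination with the loop nesting inverted: it starts with the full set of indices and, for each key of nest, strikes out the param_sets carrying a conflicting value for that key; the survivors' cardinality decides None / unique index / RuntimeError.
import Mathlib
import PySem

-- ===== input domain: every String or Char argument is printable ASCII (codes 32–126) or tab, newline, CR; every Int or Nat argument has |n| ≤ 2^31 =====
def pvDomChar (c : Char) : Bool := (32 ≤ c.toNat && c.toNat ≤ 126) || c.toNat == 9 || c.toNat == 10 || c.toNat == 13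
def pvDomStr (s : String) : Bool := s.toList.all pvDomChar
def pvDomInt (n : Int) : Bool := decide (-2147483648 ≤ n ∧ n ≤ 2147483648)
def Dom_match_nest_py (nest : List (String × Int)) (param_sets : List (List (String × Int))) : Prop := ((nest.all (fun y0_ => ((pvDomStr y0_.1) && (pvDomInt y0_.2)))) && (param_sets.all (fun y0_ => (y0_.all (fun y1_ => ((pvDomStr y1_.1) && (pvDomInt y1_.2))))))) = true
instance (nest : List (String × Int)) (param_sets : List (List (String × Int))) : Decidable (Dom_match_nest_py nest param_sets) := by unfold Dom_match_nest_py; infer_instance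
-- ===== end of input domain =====

-- B inverts the loop nesting: instead of testing each param_set against the whole nest and
-- counting matches, it starts from all indices and eliminates, key by key of nest, the
-- param_sets with a conflicting value; objective: alternative algorithm, same exact behaviour.

-- ===== PORT A =====
-- _match_nest1: Python dict == ignores order, so the subset-dict comparison is ported as
-- "same value at every common key" (both subsets have exactly the common keys).
def matchNest1A (nest ps : List (String × Int)) : Bool :=
  let nd := PySem.Dict.ofList nest
  let pd := PySem.Dict.ofList ps
  let common := PySem.Set.inter nd.keys pd.keys
  common.all (fun k => nd.get? k == pd.get? k)

def match_nest_py (nest : List (String × Int)) (param_sets : List (List (String × Int))) : Option Int :=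
  let ms := param_sets.map (fun ps => matchNest1A nest ps)
  let n := ms.count true
  if n = 0 then none
  else if n = 1 then (PySem.List.index? ms true).map (fun i => (i : Int))
  else none  -- Python raises RuntimeError here; excluded by Pre_

-- ===== PORT B =====
-- one key/value of nest is compatible with ps iff ps lacks the key or carries the same value
def matchKeyB (kv : String × Int) (ps : List (String × Int)) : Bool :=
  let pd := PySem.Dict.ofList ps
  !(pd.contains kv.1) || (pd.get? kv.1 == some kv.2)

def match_nest_py_alt (nest : List (String × Int)) (param_sets : List (List (String × Int))) : Option Int :=
  let cand := ((PySem.Dict.ofList nest).items).foldl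
    (fun (cand : List Nat) kv => cand.filter (fun i => matchKeyB kv (param_sets.getD i [])))
    (List.range param_sets.length)
  match cand with
  | [] => none
  | [i] => some (i : Int)
  | _ => none  -- Python raises RuntimeError here; excluded by Pre_

-- ===== PRECONDITION & SPEC =====
-- Pre_ excludes exactly the inputs where A raises RuntimeError: more than one param_set
-- agreeing with nest on all common keys (it never narrows A's returning domain otherwise).
def Pre_match_nest_py (nest : List (String × Int)) (param_sets : List (List (String × Int))) : Prop :=
  (param_sets.countP (fun ps => decide (∀ p ∈ (PySem.Dict.ofList nest).items,
      (PySem.Dict.ofList ps).contains p.1 = true → (PySem.Dict.ofList ps).get? p.1 = some p.2))) ≤ 1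
instance (nest : List (String × Int)) (param_sets : List (List (String × Int))) : Decidable (Pre_match_nest_py nest param_sets) := by unfold Pre_match_nest_py; infer_instance

def pvWitness_match_nest_py : (List (String × Int)) × (List (List (String × Int))) :=
  ([("a", 1)], [[("a", 1)], [("a", 2)]])

def Spec_match_nest_py (nest : List (String × Int)) (param_sets : List (List (String × Int))) (out : Option Int) : Prop := out = match_nest_py_alt nest param_sets
instance (nest : List (String × Int)) (param_sets : List (List (String × Int))) (out : Option Int) : Decidable (Spec_match_nest_py nest param_sets out) := by unfold Spec_match_nest_py; infer_instance

-- ===== CLAIM (what is proved, stated in full; the proofs are below) =====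
def Claim_equal_match_nest_py : Prop := ∀ (nest : List (String × Int)) (param_sets : List (List (String × Int))), Dom_match_nest_py nest param_sets → Pre_match_nest_py nest param_sets → Spec_match_nest_py nest param_sets (match_nest_py nest param_sets)

-- ===== LEMMAS AND PROOFS =====

-- A's per-set test equals "every key/value of nest is compatible with ps".
lemma matchNest1_eq (nest ps : List (String × Int)) :
    matchNest1A nest ps
      = ((PySem.Dict.ofList nest).items).all (fun kv => matchKeyB kv ps) := by
  rw [Bool.eq_iff_iff]
  simp only [matchNest1A, matchKeyB, List.all_eq_true, Bool.or_eq_true, Bool.not_eq_true',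
    beq_iff_eq, PySem.Set.mem_inter]
  constructor
  · intro H p hp
    by_cases hc : (PySem.Dict.ofList ps).contains p.1 = true
    · right
      have hk : p.1 ∈ (PySem.Dict.ofList nest).keys := PySem.Dict.mem_keys_of_mem_items _ hp
      have hk' : p.1 ∈ (PySem.Dict.ofList ps).keys := (PySem.Dict.contains_iff_mem_keys _ _).mp hc
      have hg := H p.1 ⟨hk, hk'⟩
      have hn : (PySem.Dict.ofList nest).get? p.1 = some p.2 :=
        PySem.Dict.get?_of_mem_items _ hp (PySem.Dict.nodup_keys_ofList nest)
      rw [← hg, hn]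
    · left
      exact Bool.not_eq_true _ ▸ (by simpa using hc)
  · intro H k hk
    obtain ⟨h1, h2⟩ := hk
    have h1' : k ∈ ((PySem.Dict.ofList nest).items.map (·.1)) := by
      simpa [PySem.Dict.keys] using h1
    obtain ⟨p, hp, hpk⟩ := List.mem_map.mp h1'
    have hn : (PySem.Dict.ofList nest).get? k = some p.2 := by
      rw [← hpk]
      exact PySem.Dict.get?_of_mem_items _ hp (PySem.Dict.nodup_keys_ofList nest)
    have hc : (PySem.Dict.ofList ps).contains k = true := (PySem.Dict.contains_iff_mem_keys _ _).mpr h2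
    rcases H p hp with hfalse | hval
    · rw [hpk] at hfalse
      rw [hfalse] at hc
      cases hc
    · rw [hn, ← hpk, hval]

-- A fold of filters is one filter by the conjunction.
lemma foldl_filter {α β : Type} (p : α → β → Bool) :
    ∀ (items : List α) (init : List β),
      items.foldl (fun c kv => c.filter (p kv)) init
        = init.filter (fun i => items.all (fun kv => p kv i)) := by
  intro items
  induction items with
  | nil => intro init; simp
  | cons x xs ih =>
    intro init
    rw [List.foldl_cons, ih, List.filter_filter]
    refine List.filter_congr ?_
    intro i _
    simp [Bool.and_comm]

-- The surviving-index list over range, in cons form.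
lemma range_filter_cons {α : Type} (p : α → Bool) (d : α) (x : α) (xs : List α) :
    (List.range (x :: xs).length).filter (fun i => p ((x :: xs).getD i d))
      = (if p x then [0] else [])
        ++ ((List.range xs.length).filter (fun i => p (xs.getD i d))).map (· + 1) := by
  rw [List.length_cons, List.range_succ_eq_map, List.filter_cons, List.filter_map]
  by_cases h : p x = true <;>
    simp [h, Function.comp_def, Nat.succ_eq_add_one]

lemma range_filter_length {α : Type} (p : α → Bool) (d : α) :
    ∀ (l : List α),
      ((List.range l.length).filter (fun i => p (l.getD i d))).length
        = (l.map p).count true := by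
  intro l
  induction l with
  | nil => simp
  | cons x xs ih =>
    rw [range_filter_cons, List.length_append, List.length_map, ih, List.map_cons]
    by_cases h : p x = true
    · simp [h]
      omega
    · simp [h]

lemma range_filter_head {α : Type} (p : α → Bool) (d : α) :
    ∀ (l : List α),
      ((List.range l.length).filter (fun i => p (l.getD i d))).head?
        = PySem.List.index? (l.map p) true := by
  intro l
  induction l with
  | nil => simp [PySem.List.index?]
  | cons x xs ih =>
    rw [range_filter_cons, List.map_cons]
    by_cases h : p x = true
    · rw [h, PySem.List.index?_cons_self]
      simp
    · have h' : p x = false := by simpa using h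
      rw [h', PySem.List.index?_cons_of_ne _ (by decide), ← ih]
      simp

-- ===== VERDICT (by name: the statement is the Claim_ definition above) =====
theorem match_nest_py_spec : Claim_equal_match_nest_py := by
  intro nest param_sets _ _
  unfold Spec_match_nest_py match_nest_py match_nest_py_alt
  rw [foldl_filter]
  have hmap : param_sets.map (fun ps => matchNest1A nest ps)
      = param_sets.map (fun ps =>
          ((PySem.Dict.ofList nest).items).all (fun kv => matchKeyB kv ps)) :=
    List.map_congr_left (fun ps _ => matchNest1_eq nest ps)
  rw [hmap]
  set p : List (String × Int) → Bool :=
    fun ps => ((PySem.Dict.ofList nest).items).all (fun kv => matchKeyB kv ps) with hp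
  have hpred : (fun i => ((PySem.Dict.ofList nest).items).all
      (fun kv => matchKeyB kv (param_sets.getD i []))) = (fun i => p (param_sets.getD i [])) := rfl
  rw [hpred]
  have hlen := range_filter_length p [] param_sets
  have hhead := range_filter_head p [] param_sets
  set cand := (List.range param_sets.length).filter (fun i => p (param_sets.getD i [])) with hcand
  rcases hc : cand with _ | ⟨i, _ | ⟨j, t⟩⟩
  · rw [hc] at hlen
    simp at hlen
    simp [← hlen]
  · rw [hc] at hlen hhead
    simp only [List.length_singleton, List.head?_cons] at hlen hhead
    rw [PySem.List.index?_eq_idxOf?] at hhead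
    simp [← hlen, ← hhead]
  · rw [hc] at hlen
    simp only [List.length_cons] at hlen
    simp [← hlen]
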